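-- pv_equiv track=rewrite | github.com/JamesJux/Advent-of-Code-2021 | main.py | enough_pairs
-- ===== SOURCE A (Python) =====
-- def enough_pairs(passwort_array):
--     pairs = 0
--     count = 1
--     for jdx in range(0, len(passwort_array) - 1):
--         if passwort_array[jdx] == passwort_array[jdx + 1]:
--             count += 1
--             if count == 4:
--                 return True
--             if count == 2:
--                 pairs += 1
--         else:
--             count = 1
--     if pairs >= 2:
--         return True
--     else:
--         return False
-- ===== SOURCE B (Python) =====
-- def enough_pairs(passwort_array):
--     # Build the run-length table first, then aggregate over it in two passes.
--     lengths = []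
--     if passwort_array:
--         cur = passwort_array[0]
--         count = 1
--         for x in passwort_array[1:]:
--             if x == cur:
--                 count += 1
--             else:
--                 lengths.append(count)
--                 cur = x
--                 count = 1
--         lengths.append(count)
--     if any(n >= 4 for n in lengths):
--         return True
--     return sum(1 for n in lengths if n >= 2) >= 2
-- ===== Notes on version B (the rewrite author's own statement) =====
-- stated objective: simpler
-- what changed: Replaces A's single interleaved index loop with in-loop pair counting and early return by first building the run-length table of the list and then answering with two plain aggregations (any run >= 4, else count of runs >= 2).
import Mathlib
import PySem

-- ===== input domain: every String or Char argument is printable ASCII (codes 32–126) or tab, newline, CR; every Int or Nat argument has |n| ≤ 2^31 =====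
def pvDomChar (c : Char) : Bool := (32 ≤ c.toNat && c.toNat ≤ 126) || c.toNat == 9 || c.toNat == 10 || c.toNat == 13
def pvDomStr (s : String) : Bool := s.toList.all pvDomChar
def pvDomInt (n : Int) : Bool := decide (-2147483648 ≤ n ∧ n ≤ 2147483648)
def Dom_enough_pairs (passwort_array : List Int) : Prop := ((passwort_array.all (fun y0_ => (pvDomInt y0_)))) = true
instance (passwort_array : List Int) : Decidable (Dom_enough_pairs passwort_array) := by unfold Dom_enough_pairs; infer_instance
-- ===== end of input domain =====

-- B builds the run-length table first and then aggregates over it, instead of A's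
-- single interleaved index loop with in-loop pair counting and early return (objective: simpler).

-- ===== PORT A =====
-- the for-loop over range(0, len-1) with early return, state (pairs, count)
def enough_pairs_go (xs : List Int) : List Int → Int → Int → Bool
  | [], pairs, _count => decide (2 ≤ pairs)
  | jdx :: rest, pairs, count =>
    if PySem.List.pyGetD xs jdx 0 = PySem.List.pyGetD xs (jdx + 1) 0 then
      if count + 1 = 4 then true
      else if count + 1 = 2 then enough_pairs_go xs rest (pairs + 1) (count + 1)
      else enough_pairs_go xs rest pairs (count + 1)
    else enough_pairs_go xs rest pairs 1

def enough_pairs (passwort_array : List Int) : Bool :=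
  enough_pairs_go passwort_array
    (PySem.List.pyRange 0 ((passwort_array.length : Int) - 1) 1) 0 1

-- ===== PORT B =====
-- the for-loop over passwort_array[1:] that emits the run lengths
def rlGo : List Int → Int → Int → List Int
  | [], _cur, count => [count]
  | x :: rest, cur, count =>
    if x = cur then rlGo rest cur (count + 1) else count :: rlGo rest x 1

def enough_pairs_alt (passwort_array : List Int) : Bool :=
  let lengths : List Int :=
    match passwort_array with
    | [] => []
    | x :: rest => rlGo rest x 1
  if lengths.any (fun n => decide (4 ≤ n)) then true
  else decide (2 ≤ (lengths.filter (fun n => decide (2 ≤ n))).length)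

-- ===== PRECONDITION & SPEC =====
def Spec_enough_pairs (passwort_array : List Int) (out : Bool) : Prop := out = enough_pairs_alt passwort_array
instance (passwort_array : List Int) (out : Bool) : Decidable (Spec_enough_pairs passwort_array out) := by unfold Spec_enough_pairs; infer_instance

-- ===== CLAIM (what is proved, stated in full; the proofs are below) =====
def Claim_equal_enough_pairs : Prop := ∀ (passwort_array : List Int), Dom_enough_pairs passwort_array → Spec_enough_pairs passwort_array (enough_pairs passwort_array)

-- ===== LEMMAS AND PROOFS =====

lemma or_decide_congr (b : Bool) {p q : Prop} [Decidable p] [Decidable q] (h : p ↔ q) :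
    (b || decide p) = (b || decide q) := by
  cases b <;> simp [h]

-- A's loop re-expressed over the list of adjacent pairs
def pairLoop : List (Int × Int) → Int → Int → Bool
  | [], pairs, _count => decide (2 ≤ pairs)
  | (a, b) :: rest, pairs, count =>
    if a = b then
      if count + 1 = 4 then true
      else if count + 1 = 2 then pairLoop rest (pairs + 1) (count + 1)
      else pairLoop rest pairs (count + 1)
    else pairLoop rest pairs 1

lemma go_eq_pairLoop (xs : List Int) :
    ∀ (k n : Nat), k = xs.length - 1 - n → ∀ (pairs count : Int),
      enough_pairs_go xs (PySem.List.pyRange (n : Int) ((xs.length : Int) - 1) 1) pairs count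
        = pairLoop ((xs.zip xs.tail).drop n) pairs count := by
  intro k
  induction k with
  | zero =>
    intro n hk pairs count
    rw [PySem.List.pyRange_one_eq_nil (by omega)]
    rw [List.drop_eq_nil_of_le (by simp [List.length_zip]; omega)]
    rfl
  | succ k ih =>
    intro n hk pairs count
    have hn : n + 1 < xs.length := by omega
    have hn0 : n < xs.length := by omega
    have hzl : n < (xs.zip xs.tail).length := by
      simp [List.length_zip, List.length_tail]; omega
    rw [PySem.List.pyRange_one_cons (by omega)]
    rw [List.drop_eq_getElem_cons hzl]
    have hget : (xs.zip xs.tail)[n] = (xs[n]'hn0, xs[n + 1]'hn) := by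
      simp [List.getElem_zip, List.getElem_tail]
    have h1 : PySem.List.pyGetD xs (n : Int) 0 = xs[n]'hn0 := by
      simp [List.getD_eq_getElem?_getD, List.getElem?_eq_getElem hn0]
    have h2 : PySem.List.pyGetD xs (((n + 1 : Nat) : Int)) 0 = xs[n + 1]'hn := by
      rw [PySem.List.pyGetD_natCast]
      exact List.getD_eq_getElem xs 0 hn
    have hcast : (n : Int) + 1 = ((n + 1 : Nat) : Int) := by push_cast; ring
    have ihn := ih (n + 1) (by omega)
    simp only [enough_pairs_go, pairLoop, List.get_eq_getElem, hget, h1, hcast, h2, ihn]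

lemma rlGo_any_ge (ys : List Int) :
    ∀ (cur count : Int), 4 ≤ count →
      (rlGo ys cur count).any (fun n => decide (4 ≤ n)) = true := by
  induction ys with
  | nil => intro cur count h; simp [rlGo]; omega
  | cons y ys ih =>
    intro cur count h
    unfold rlGo
    split_ifs with hy
    · exact ih cur (count + 1) (by omega)
    · simp; left; omega

lemma pairLoop_eq (ys : List Int) :
    ∀ (x pairs count : Int), 1 ≤ count → count ≤ 3 →
      pairLoop ((x :: ys).zip ys) pairs count
        = (if (rlGo ys x count).any (fun n => decide (4 ≤ n)) then true
           else decide (pairs + (((rlGo ys x count).filter (fun n => decide (2 ≤ n))).length : Int)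
                          ≥ 2 + (if 2 ≤ count then 1 else 0))) := by
  induction ys with
  | nil =>
    intro x pairs count h1 h3
    simp only [List.zip_nil_right, pairLoop, rlGo]
    by_cases h2 : (2 : Int) ≤ count
    all_goals simp [h2, show ¬ (4 ≤ count) by omega]
    all_goals omega
  | cons y ys ih =>
    intro x pairs count h1 h3
    have hz : (x :: y :: ys).zip (y :: ys) = (x, y) :: ((y :: ys).zip ys) := by simp
    rw [hz]
    by_cases hxy : x = y
    · have hyx : y = x := hxy.symm
      simp only [pairLoop, rlGo, if_pos hxy, if_pos hyx]
      by_cases h4 : count + 1 = 4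
      · rw [if_pos h4, rlGo_any_ge ys x (count + 1) (by omega)]
        simp
      · rw [if_neg h4]
        by_cases h2 : count + 1 = 2
        · rw [if_pos h2]
          rw [hxy, ih y (pairs + 1) (count + 1) (by omega) (by omega)]
          rw [if_pos (show (2:Int) ≤ count + 1 by omega), if_neg (show ¬ (2:Int) ≤ count by omega)]
          rw [hyx]
          split_ifs
          all_goals try rfl
          all_goals try rw [decide_eq_decide]
          all_goals omega
        · rw [if_neg h2]
          rw [hxy, ih y pairs (count + 1) (by omega) (by omega)]
          rw [if_pos (show (2:Int) ≤ count + 1 by omega), if_pos (show (2:Int) ≤ count by omega)]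
    · have hyx : ¬ y = x := fun h => hxy h.symm
      simp only [pairLoop, rlGo, if_neg hxy, if_neg hyx]
      rw [ih y pairs 1 (by omega) (by omega)]
      have h4c : ¬ (4 ≤ count) := by omega
      simp only [List.any_cons, List.filter_cons, decide_eq_false h4c, Bool.false_or]
      by_cases h2 : (2 : Int) ≤ count
      all_goals simp [h2]
      all_goals exact or_decide_congr _ (by omega)

-- ===== VERDICT (by name: the statement is the Claim_ definition above) =====
theorem enough_pairs_spec : Claim_equal_enough_pairs := by
  intro xs _
  show enough_pairs xs = enough_pairs_alt xs
  cases xs with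
  | nil => decide
  | cons x rest =>
    have h0 := go_eq_pairLoop (x :: rest) ((x :: rest).length - 1 - 0) 0 rfl 0 1
    simp only [Nat.cast_zero, List.drop_zero] at h0
    unfold enough_pairs
    rw [h0]
    have htail : (x :: rest).tail = rest := rfl
    rw [htail, pairLoop_eq rest x 0 1 (by omega) (by omega)]
    rw [if_neg (by norm_num : ¬ ((2:Int) ≤ 1))]
    have halt : enough_pairs_alt (x :: rest)
        = (if (rlGo rest x 1).any (fun n => decide (4 ≤ n)) then true
           else decide (2 ≤ ((rlGo rest x 1).filter (fun n => decide (2 ≤ n))).length)) := rfl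
    rw [halt]
    split_ifs with ha
    · rfl
    · rw [decide_eq_decide]
      push_cast
      omega
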